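-- pv_equiv track=rewrite | github.com/leo-editor/leo-editor | leo/external/leoSAGlobals.py | skip_blank_lines
-- ===== SOURCE A (Python) =====
-- def is_nl(s,i):
--
--     return i < len(s) and (s[i] == '\n' or s[i] == '\r')
--
-- def is_ws(c):
--
--     return c == '\t' or c == ' '
--
-- def match(s,i,pattern):
--
--     return s and pattern and s.find(pattern,i,i+len(pattern)) == i
--
-- def skip_blank_lines(s,i):
--
--     while i < len(s):
--         if is_nl(s,i) :
--             i = skip_nl(s,i)
--         elif is_ws(s[i]):
--             j = skip_ws(s,i)
--             if is_nl(s,j):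
--                 i = j
--             else: break
--         else: break
--     return i
--
-- def skip_nl (s,i):
--
--     '''Skips a single "logical" end-of-line character.'''
--
--     if match(s,i,"\r\n"): return i + 2
--     elif match(s,i,'\n') or match(s,i,'\r'): return i + 1
--     else: return i
--
-- def skip_ws(s,i):
--
--     n = len(s)
--     while i < n and is_ws(s[i]):
--         i += 1
--     return i
-- ===== SOURCE B (Python) =====
-- def skip_blank_lines(s, i):
--     n = len(s)
--     j = i
--     result = i
--     while j < n:
--         c = s[j]
--         if c == '\n':
--             j += 1
--             result = j
--         elif c == '\r':
--             j += 2 if j + 1 < n and s[j + 1] == '\n' else 1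
--             result = j
--         elif c == '\t' or c == ' ':
--             j += 1
--         else:
--             break
--     return result
-- ===== Notes on version B (the rewrite author's own statement) =====
-- stated objective: simpler
-- what changed: Replaced A's four-helper structure (is_nl/skip_nl/skip_ws plus a commit-or-rollback lookahead that rescans the whitespace run) with one flat scan holding a committed line-start pointer: whitespace only advances the cursor, a newline commits the position after it, each character is examined once and no helper is called.
-- outside the precondition, e.g. on skip_blank_lines('a\n', -1): A returns 2, B returns 0
import Mathlib
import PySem

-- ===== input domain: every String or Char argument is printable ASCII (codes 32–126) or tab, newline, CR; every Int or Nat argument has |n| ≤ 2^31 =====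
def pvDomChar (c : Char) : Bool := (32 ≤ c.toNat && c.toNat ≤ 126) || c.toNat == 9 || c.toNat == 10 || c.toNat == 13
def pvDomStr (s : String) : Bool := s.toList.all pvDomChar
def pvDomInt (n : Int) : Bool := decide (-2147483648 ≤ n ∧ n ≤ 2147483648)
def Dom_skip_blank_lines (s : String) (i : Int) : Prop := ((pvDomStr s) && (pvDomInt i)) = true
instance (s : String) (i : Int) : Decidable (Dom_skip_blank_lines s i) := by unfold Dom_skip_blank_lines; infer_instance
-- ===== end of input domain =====

-- B replaces A's four-helper commit-or-rollback scan by one flat loop with a committed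
-- line-start pointer (objective: simpler); equivalence is claimed for 0 ≤ i (see Pre_).

-- ===== PORT A =====

-- is_ws(c)
def is_ws_p (c : Char) : Bool := c == '\t' || c == ' '

-- is_nl(s,i): 'i < len(s) and (s[i] == "\n" or s[i] == "\r")' (s[i] via pyGet?)
def is_nl_p (cs : List Char) (i : Int) : Bool :=
  decide (i < (cs.length : Int)) &&
    ((PySem.List.pyGet? cs i).elim false (fun c => c == '\n' || c == '\r'))

-- hand port of str.find(pattern, a, b) (Python clamping of the bounds, first match, -1 if none);
-- exact for the calls A makes (PySem.Str has no bounded find)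
def pyFindB (cs pat : List Char) (a b : Int) : Int :=
  let n : Int := cs.length
  let lo := (min (max (if a < 0 then n + a else a) 0) n).toNat
  let hi := (min (max (if b < 0 then n + b else b) 0) n).toNat
  match (List.range' lo (hi + 1 - pat.length - lo)).find?
      (fun j => decide ((cs.drop j).take pat.length = pat)) with
  | some j => (j : Int)
  | none => -1

-- match(s,i,pattern): 's and pattern and s.find(pattern,i,i+len(pattern)) == i'
def match_p (cs pat : List Char) (i : Int) : Bool :=
  !cs.isEmpty && !pat.isEmpty && (pyFindB cs pat i (i + pat.length) == i)

-- skip_nl(s,i)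
def skip_nl_p (cs : List Char) (i : Int) : Int :=
  if match_p cs ['\r', '\n'] i then i + 2
  else if match_p cs ['\n'] i || match_p cs ['\r'] i then i + 1
  else i

-- skip_ws(s,i)
def skip_ws_p (cs : List Char) (i : Int) : Int :=
  if h : i < (cs.length : Int) ∧ (PySem.List.pyGet? cs i).elim false is_ws_p = true then
    skip_ws_p cs (i + 1)
  else i
termination_by ((cs.length : Int) - i).toNat
decreasing_by obtain ⟨h1, _⟩ := h; omega

-- the while-loop of skip_blank_lines; the 'else' legs of the progress guards are where
-- Python loops forever (unreachable for 0 ≤ i)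
def sbl_loopA (cs : List Char) (i : Int) : Int :=
  if _h : i < (cs.length : Int) then
    if is_nl_p cs i then
      let i' := skip_nl_p cs i
      if _h2 : i < i' then sbl_loopA cs i' else i'
    else if (PySem.List.pyGet? cs i).elim false is_ws_p then
      let j := skip_ws_p cs i
      if is_nl_p cs j then
        if _h3 : i < j then sbl_loopA cs j else j
      else i
    else i
  else i
termination_by ((cs.length : Int) - i).toNat
decreasing_by all_goals omega

def skip_blank_lines (s : String) (i : Int) : Int := sbl_loopA s.toList i

-- ===== PORT B =====

-- the while-loop of Source B: cursor j, committed line start `result`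
def sbl_loopB (cs : List Char) (j result : Int) : Int :=
  if _h : j < (cs.length : Int) then
    let c := (PySem.List.pyGet? cs j).getD ' '
    if c == '\n' then sbl_loopB cs (j + 1) (j + 1)
    else if c == '\r' then
      if decide (j + 1 < (cs.length : Int)) && ((PySem.List.pyGet? cs (j + 1)).getD ' ' == '\n') then
        sbl_loopB cs (j + 2) (j + 2)
      else sbl_loopB cs (j + 1) (j + 1)
    else if c == '\t' || c == ' ' then sbl_loopB cs (j + 1) result
    else result
  else result
termination_by ((cs.length : Int) - j).toNat
decreasing_by all_goals omega

def skip_blank_lines_alt (s : String) (i : Int) : Int := sbl_loopB s.toList i i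

-- ===== PRECONDITION & SPEC =====
-- Pre_ excludes negative i, on which A's behaviour is an accident of Python's
-- negative-index wraparound and str.find clamping: A can return a quirky value
-- (skip_blank_lines('a\n', -1) = 2), raise IndexError (i < -len(s)), or loop forever
-- (skip_blank_lines('\n\n\n\n\n', -5)).
def Pre_skip_blank_lines (s : String) (i : Int) : Prop := 0 ≤ i
instance (s : String) (i : Int) : Decidable (Pre_skip_blank_lines s i) := by
  unfold Pre_skip_blank_lines; infer_instance

def pvWitness_skip_blank_lines : String × Int := (" \t\n\r\nx", 0)

def Spec_skip_blank_lines (s : String) (i : Int) (out : Int) : Prop := out = skip_blank_lines_alt s i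
instance (s : String) (i : Int) (out : Int) : Decidable (Spec_skip_blank_lines s i out) := by
  unfold Spec_skip_blank_lines; infer_instance

-- ===== CLAIM (what is proved, stated in full; the proofs are below) =====
def Claim_equal_skip_blank_lines : Prop := ∀ (s : String) (i : Int), Dom_skip_blank_lines s i → Pre_skip_blank_lines s i → Spec_skip_blank_lines s i (skip_blank_lines s i)

-- ===== LEMMAS AND PROOFS =====

lemma pyGet?_nonneg (cs : List Char) (i : Int) (h : 0 ≤ i) :
    PySem.List.pyGet? cs i = cs[i.toNat]? := by
  rw [← Int.toNat_of_nonneg h]; exact PySem.List.pyGet?_natCast cs i.toNat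

-- match(s,i,pat) for 0 ≤ i < len(s) and pat ≠ [] tests pat at position i
lemma match_p_eq (cs pat : List Char) (i : Int) (hpat : pat ≠ [])
    (h0 : 0 ≤ i) (hi : i < (cs.length : Int)) :
    match_p cs pat i = decide ((cs.drop i.toNat).take pat.length = pat) := by
  have hne : cs ≠ [] := by rintro rfl; simp at hi; omega
  have hlt : i.toNat < cs.length := by omega
  simp only [match_p, pyFindB]
  have hlo : (min (max (if i < 0 then (cs.length : Int) + i else i) 0) (cs.length : Int)).toNat
      = i.toNat := by split <;> omega
  have hb : ¬ (i + (pat.length : Int) < 0) := by omega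
  rw [hlo]
  simp only [if_neg hb]
  by_cases hfit : i + (pat.length : Int) ≤ (cs.length : Int)
  · have hhi : (min (max (i + (pat.length : Int)) 0) (cs.length : Int)).toNat
        = i.toNat + pat.length := by omega
    rw [hhi]
    have hcount : i.toNat + pat.length + 1 - pat.length - i.toNat = 1 := by omega
    rw [hcount]
    simp only [List.range'_one, List.find?_singleton]
    by_cases hp : (cs.drop i.toNat).take pat.length = pat
    · simp [hp, hne, hpat, Int.toNat_of_nonneg h0]
    · simp [hp, hne, hpat]
      omega
  · have hhi : (min (max (i + (pat.length : Int)) 0) (cs.length : Int)).toNat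
        = cs.length := by omega
    rw [hhi]
    have hcount : cs.length + 1 - pat.length - i.toNat = 0 := by omega
    rw [hcount]
    have hshort : (cs.drop i.toNat).take pat.length ≠ pat := by
      intro hEq
      have := congrArg List.length hEq
      simp [List.length_take, List.length_drop] at this
      omega
    simp [hshort, hne, hpat]
    omega

lemma take_one_drop (cs : List Char) (k : Nat) (c : Char) :
    ((cs.drop k).take 1 = [c]) ↔ cs[k]? = some c := by
  rw [← List.head?_drop]
  cases cs.drop k <;> simp

lemma take_two_drop (cs : List Char) (k : Nat) (c d : Char) :
    ((cs.drop k).take 2 = [c, d]) ↔ (cs[k]? = some c ∧ cs[k + 1]? = some d) := by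
  rw [← List.getElem?_drop, ← List.head?_drop]
  cases cs.drop k with
  | nil => simp
  | cons x t =>
    cases t with
    | nil => simp
    | cons y u => simp

lemma skip_nl_nl (cs : List Char) (i : Int) (h0 : 0 ≤ i) (hi : i < (cs.length : Int))
    (hc : cs[i.toNat]? = some '\n') : skip_nl_p cs i = i + 1 := by
  unfold skip_nl_p
  rw [match_p_eq cs ['\r', '\n'] i (by simp) h0 hi, match_p_eq cs ['\n'] i (by simp) h0 hi]
  have h2 : ¬ (cs.drop i.toNat).take 2 = ['\r', '\n'] := by
    rw [take_two_drop]; rintro ⟨h, -⟩; rw [hc] at h; simp at h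
  have h1 : (cs.drop i.toNat).take 1 = ['\n'] := (take_one_drop cs i.toNat '\n').mpr hc
  simp [h1, h2]

lemma skip_nl_cr (cs : List Char) (i : Int) (h0 : 0 ≤ i) (hi : i < (cs.length : Int))
    (hc : cs[i.toNat]? = some '\r') :
    skip_nl_p cs i = if cs[i.toNat + 1]? = some '\n' then i + 2 else i + 1 := by
  unfold skip_nl_p
  rw [match_p_eq cs ['\r', '\n'] i (by simp) h0 hi, match_p_eq cs ['\n'] i (by simp) h0 hi,
      match_p_eq cs ['\r'] i (by simp) h0 hi]
  by_cases hn : cs[i.toNat + 1]? = some '\n'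
  · have h2 : (cs.drop i.toNat).take 2 = ['\r', '\n'] := (take_two_drop ..).mpr ⟨hc, hn⟩
    simp [h2, hn]
  · have h2 : ¬ (cs.drop i.toNat).take 2 = ['\r', '\n'] := by
      rw [take_two_drop]; rintro ⟨-, h⟩; exact hn h
    have hr : (cs.drop i.toNat).take 1 = ['\r'] := (take_one_drop cs i.toNat '\r').mpr hc
    simp [h2, hr, hn]

lemma skip_ws_ge (cs : List Char) (i : Int) : i ≤ skip_ws_p cs i := by
  fun_induction skip_ws_p with
  | case1 i h ih => omega
  | case2 i h => omega

lemma skip_ws_post (cs : List Char) (i : Int) :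
    ¬ (skip_ws_p cs i < (cs.length : Int) ∧
       (PySem.List.pyGet? cs (skip_ws_p cs i)).elim false is_ws_p = true) := by
  fun_induction skip_ws_p with
  | case1 i h ih => exact ih
  | case2 i h => exact h

-- B's loop walks through a whitespace run without touching `result`
lemma loopB_skip_ws (cs : List Char) (i r : Int) :
    sbl_loopB cs i r = sbl_loopB cs (skip_ws_p cs i) r := by
  fun_induction skip_ws_p with
  | case1 i h ih =>
    obtain ⟨h1, h2⟩ := h
    obtain ⟨c, hc, hw⟩ : ∃ c, PySem.List.pyGet? cs i = some c ∧ is_ws_p c = true := by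
      cases hg : PySem.List.pyGet? cs i with
      | none => rw [hg] at h2; simp at h2
      | some c => rw [hg] at h2; exact ⟨c, rfl, h2⟩
    rw [← ih]
    conv_lhs => rw [sbl_loopB]
    rw [dif_pos h1, hc]
    have hwor : c = '\t' ∨ c = ' ' := by simpa [is_ws_p] using hw
    rcases hwor with rfl | rfl <;> simp
  | case2 i h => rfl

-- result is irrelevant when the cursor stands on a newline character
lemma loopB_nl_result (cs : List Char) (j r r' : Int) (hj : j < (cs.length : Int))
    (hc : (PySem.List.pyGet? cs j).getD ' ' = '\n' ∨ (PySem.List.pyGet? cs j).getD ' ' = '\r') :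
    sbl_loopB cs j r = sbl_loopB cs j r' := by
  conv_lhs => rw [sbl_loopB]
  conv_rhs => rw [sbl_loopB]
  rcases hc with hc | hc <;> simp [hj, hc]

lemma main_loop (cs : List Char) : ∀ (m : Nat) (i : Int), ((cs.length : Int) - i).toNat ≤ m →
    0 ≤ i → sbl_loopA cs i = sbl_loopB cs i i := by
  intro m
  induction m with
  | zero =>
    intro i hm h0
    rw [sbl_loopA, dif_neg (by omega), sbl_loopB, dif_neg (by omega)]
  | succ m ih =>
    intro i hm h0
    by_cases hlt : i < (cs.length : Int)
    · have hk : i.toNat < cs.length := by omega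
      have hg : PySem.List.pyGet? cs i = some cs[i.toNat] := by
        rw [pyGet?_nonneg cs i h0]; simp [hk]
      set c := cs[i.toNat] with hc
      have hgq : cs[i.toNat]? = some c := by rw [List.getElem?_eq_getElem hk]
      rw [sbl_loopA, dif_pos hlt]
      by_cases hn : c = '\n'
      · have hnl : is_nl_p cs i = true := by simp [is_nl_p, hg, hn, hlt]
        have hsk : skip_nl_p cs i = i + 1 := skip_nl_nl cs i h0 hlt (by rw [hgq, hn])
        have hB : sbl_loopB cs i i = sbl_loopB cs (i + 1) (i + 1) := by
          conv_lhs => rw [sbl_loopB]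
          rw [dif_pos hlt, hg]; simp [hn]
        simp only [hnl, if_true, hsk]
        rw [dif_pos (show i < i + 1 by omega), ih (i + 1) (by omega) (by omega), hB]
      · by_cases hr : c = '\r'
        · have hnl : is_nl_p cs i = true := by simp [is_nl_p, hg, hr, hlt]
          have hsk := skip_nl_cr cs i h0 hlt (by rw [hgq, hr])
          by_cases hnext : cs[i.toNat + 1]? = some '\n'
          · rw [if_pos hnext] at hsk
            have hlen2 : i.toNat + 1 < cs.length := (List.getElem?_eq_some_iff.mp hnext).1
            have hcond : (decide (i + 1 < (cs.length : Int)) &&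
                ((PySem.List.pyGet? cs (i + 1)).getD ' ' == '\n')) = true := by
              rw [pyGet?_nonneg cs (i + 1) (by omega)]
              rw [show (i + 1).toNat = i.toNat + 1 by omega, hnext]
              simp; omega
            have hB : sbl_loopB cs i i = sbl_loopB cs (i + 2) (i + 2) := by
              conv_lhs => rw [sbl_loopB]
              rw [dif_pos hlt, hg, hcond]; simp [hr]
            simp only [hnl, if_true, hsk]
            rw [dif_pos (show i < i + 2 by omega), ih (i + 2) (by omega) (by omega), hB]
          · rw [if_neg hnext] at hsk
            have hcond : (decide (i + 1 < (cs.length : Int)) &&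
                ((PySem.List.pyGet? cs (i + 1)).getD ' ' == '\n')) = false := by
              rw [pyGet?_nonneg cs (i + 1) (by omega)]
              rw [show (i + 1).toNat = i.toNat + 1 by omega]
              by_cases hl : i.toNat + 1 < cs.length
              · cases hx : cs[i.toNat + 1]? with
                | none => simp at hx; omega
                | some d =>
                  have : ¬ d = '\n' := by rintro rfl; exact hnext hx
                  simp [this]
              · have hni : ¬ (i + 1 < (cs.length : Int)) := by omega
                simp [hni]
            have hB : sbl_loopB cs i i = sbl_loopB cs (i + 1) (i + 1) := by
              conv_lhs => rw [sbl_loopB]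
              rw [dif_pos hlt, hg, hcond]; simp [hr]
            simp only [hnl, if_true, hsk]
            rw [dif_pos (show i < i + 1 by omega), ih (i + 1) (by omega) (by omega), hB]
        · have hnl : is_nl_p cs i = false := by simp [is_nl_p, hg, hn, hr]
          by_cases hw : is_ws_p c = true
          · have hwor : c = '\t' ∨ c = ' ' := by simpa [is_ws_p] using hw
            have hB : sbl_loopB cs i i = sbl_loopB cs (i + 1) i := by
              conv_lhs => rw [sbl_loopB]
              rw [dif_pos hlt, hg]
              rcases hwor with h | h <;> simp [h]
            have hske : skip_ws_p cs (i + 1) = skip_ws_p cs i := by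
              conv_rhs => rw [skip_ws_p, dif_pos ⟨hlt, by rw [hg]; simpa using hw⟩]
            have hji : i < skip_ws_p cs i := by
              have := skip_ws_ge cs (i + 1); omega
            rw [hB, loopB_skip_ws cs (i + 1) i, hske]
            simp only [hnl, Bool.false_eq_true, if_false, hg, Option.elim_some, hw, if_true]
            set j := skip_ws_p cs i with hj
            by_cases hnlj : is_nl_p cs j = true
            · have hjlt : j < (cs.length : Int) := by
                simp only [is_nl_p, Bool.and_eq_true, decide_eq_true_eq] at hnlj
                exact hnlj.1
              obtain ⟨d, hd, hdnl⟩ : ∃ d, PySem.List.pyGet? cs j = some d ∧ (d = '\n' ∨ d = '\r') := by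
                simp only [is_nl_p, Bool.and_eq_true, decide_eq_true_eq] at hnlj
                cases hx : PySem.List.pyGet? cs j with
                | none => rw [hx] at hnlj; simp at hnlj
                | some d =>
                  rw [hx] at hnlj
                  exact ⟨d, rfl, by simpa using hnlj.2⟩
              simp only [hnlj, if_true]
              rw [dif_pos hji, ih j (by omega) (by omega)]
              exact loopB_nl_result cs j j i hjlt (by rw [hd]; simpa using hdnl)
            · simp only [hnlj, Bool.false_eq_true, if_false]
              have hpost := skip_ws_post cs i
              rw [← hj] at hpost
              by_cases hjlt : j < (cs.length : Int)
              · have hgj : PySem.List.pyGet? cs j = some cs[j.toNat] := by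
                  rw [pyGet?_nonneg cs j (by omega)]
                  simp [show j.toNat < cs.length by omega]
                have hdw : ¬ is_ws_p cs[j.toNat] = true := by
                  intro hx
                  exact hpost ⟨hjlt, by rw [hgj]; simpa using hx⟩
                have hdn : ¬ cs[j.toNat] = '\n' := by
                  intro hx; apply absurd hnlj; simp [is_nl_p, hgj, hx, hjlt]
                have hdr : ¬ cs[j.toNat] = '\r' := by
                  intro hx; apply absurd hnlj; simp [is_nl_p, hgj, hx, hjlt]
                simp only [is_ws_p, Bool.or_eq_true, beq_iff_eq, not_or] at hdw
                conv_rhs => rw [sbl_loopB]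
                rw [dif_pos hjlt, hgj]
                simp [hdn, hdr, hdw.1, hdw.2]
              · conv_rhs => rw [sbl_loopB]
                rw [dif_neg hjlt]
          · simp only [is_ws_p, Bool.or_eq_true, beq_iff_eq, not_or] at hw
            simp only [hnl, Bool.false_eq_true, if_false, hg, Option.elim_some]
            conv_rhs => rw [sbl_loopB]
            rw [dif_pos hlt, hg]
            simp [is_ws_p, hn, hr, hw.1, hw.2]
    · rw [sbl_loopA, dif_neg hlt, sbl_loopB, dif_neg hlt]

-- ===== VERDICT (by name: the statement is the Claim_ definition above) =====
theorem skip_blank_lines_spec : Claim_equal_skip_blank_lines := by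
  intro s i _dom hpre
  unfold Spec_skip_blank_lines skip_blank_lines skip_blank_lines_alt
  exact main_loop s.toList ((s.toList.length : Int) - i).toNat i (le_refl _) hpre
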